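-- pv_equiv track=rewrite | github.com/MaSch882/advent_of_code | 2022/solutions/solution_03_12_2022.py | divide_input_data_into_groups_of_three
-- ===== SOURCE A (Python) =====
-- def divide_input_data_into_groups_of_three(list_of_strings: list[str]) -> list[list[str]]:
--     list_of_groups = []
--     current_group = []
--     for i, string in enumerate(list_of_strings):
--         if (i + 1) % 3 == 0:
--             current_group.append(list_of_strings[i])
--             current_group.append(list_of_strings[i - 1])
--             current_group.append(list_of_strings[i - 2])
--             list_of_groups.append(current_group)
--             current_group = []
--     return list_of_groups
-- ===== SOURCE B (Python) =====
-- def divide_input_data_into_groups_of_three(list_of_strings: list[str]) -> list[list[str]]: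
--     groups = []
--     i = 0
--     while i + 3 <= len(list_of_strings):
--         groups.append(list_of_strings[i:i + 3][::-1])
--         i += 3
--     return groups
-- ===== Notes on version B (the rewrite author's own statement) =====
-- stated objective: simpler
-- what changed: Replaced A's enumerate scan with a modulo test, re-indexing back into the original list and a mutable current-group accumulator by a plain index loop that steps by 3 and appends the reversed slice list_of_strings[i:i+3][::-1].
import Mathlib
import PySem

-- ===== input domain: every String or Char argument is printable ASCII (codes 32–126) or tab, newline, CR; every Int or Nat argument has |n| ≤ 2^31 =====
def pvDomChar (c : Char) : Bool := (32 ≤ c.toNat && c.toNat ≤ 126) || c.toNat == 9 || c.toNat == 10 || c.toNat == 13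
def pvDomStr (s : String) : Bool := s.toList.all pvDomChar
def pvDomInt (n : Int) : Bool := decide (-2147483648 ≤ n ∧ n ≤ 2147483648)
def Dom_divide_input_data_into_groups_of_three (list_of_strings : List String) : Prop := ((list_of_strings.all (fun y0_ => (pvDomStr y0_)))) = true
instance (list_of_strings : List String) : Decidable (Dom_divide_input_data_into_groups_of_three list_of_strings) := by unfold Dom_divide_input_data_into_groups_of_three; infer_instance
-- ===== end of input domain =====

-- B replaces the enumerate/modulo scan by a simpler index loop that reverses each 3-slice; A = B everywhere, proved below.

-- ===== PORT A =====
-- loop body of A's for-loop, named so the proofs can refer to it; the indices i, i-1, i-2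
-- are always in range when the branch fires, so .getD "" is never reached on any input.
def pvAStep (L : List String) (st : List (List String) × List String) (p : Int × String) :
    List (List String) × List String :=
  if PySem.Int.mod (p.1 + 1) 3 == 0 then
    (st.1 ++ [st.2 ++ [(PySem.List.pyGet? L p.1).getD "",
                       (PySem.List.pyGet? L (p.1 - 1)).getD "",
                       (PySem.List.pyGet? L (p.1 - 2)).getD ""]], [])
  else st

def divide_input_data_into_groups_of_three (list_of_strings : List String) : List (List String) :=
  ((PySem.List.enumerate list_of_strings 0).foldl (pvAStep list_of_strings) ([], [])).1

-- ===== PORT B =====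
-- the while-loop of Source B: state (groups, i), i advances by 3 while i + 3 <= len
def pvBLoop (xs : List String) (groups : List (List String)) (i : Int) : List (List String) :=
  if i + 3 ≤ (xs.length : Int) then
    pvBLoop xs
      (groups ++ [(PySem.List.slice? (PySem.List.slice xs (some i) (some (i + 3))) none none (-1)).getD []])
      (i + 3)
  else groups
termination_by ((xs.length : Int) - i).toNat
decreasing_by omega

def divide_input_data_into_groups_of_three_alt (list_of_strings : List String) : List (List String) :=
  pvBLoop list_of_strings [] 0

-- ===== PRECONDITION & SPEC =====
def Spec_divide_input_data_into_groups_of_three (list_of_strings : List String) (out : List (List String)) : Prop := out = divide_input_data_into_groups_of_three_alt list_of_strings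
instance (list_of_strings : List String) (out : List (List String)) : Decidable (Spec_divide_input_data_into_groups_of_three list_of_strings out) := by unfold Spec_divide_input_data_into_groups_of_three; infer_instance

-- ===== CLAIM (what is proved, stated in full; the proofs are below) =====
def Claim_equal_divide_input_data_into_groups_of_three : Prop := ∀ (list_of_strings : List String), Dom_divide_input_data_into_groups_of_three list_of_strings → Spec_divide_input_data_into_groups_of_three list_of_strings (divide_input_data_into_groups_of_three list_of_strings)

-- ===== LEMMAS AND PROOFS =====

-- canonical form of both programs: chunk off three, reversed
def chunk3 : List String → List (List String)
  | a :: b :: c :: r => [c, b, a] :: chunk3 r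
  | _ => []

theorem chunk3_step (l : List String) (h : 3 ≤ l.length) :
    chunk3 l = (l.take 3).reverse :: chunk3 (l.drop 3) := by
  match l, h with
  | a :: b :: c :: r, _ => simp [chunk3]

theorem chunk3_short (l : List String) (h : l.length < 3) : chunk3 l = [] := by
  match l, h with
  | [], _ => rfl
  | [a], _ => rfl
  | [a, b], _ => rfl

theorem pvBLoop_eq (xs : List String) :
    ∀ (n i : Nat) (groups : List (List String)), xs.length ≤ i + n →
      pvBLoop xs groups (i : Int) = groups ++ chunk3 (xs.drop i) := by
  intro n
  induction n with
  | zero =>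
      intro i groups h
      rw [pvBLoop, if_neg (by omega)]
      rw [chunk3_short _ (by simp; omega)]
      simp
  | succ n ih =>
      intro i groups h
      rw [pvBLoop]
      by_cases hc : (i : Int) + 3 ≤ (xs.length : Int)
      · rw [if_pos hc]
        have hs : PySem.List.slice xs (some (i : Int)) (some ((i : Int) + 3))
            = (xs.drop i).take 3 := by
          rw [show ((i : Int) + 3) = ((i : Int) + ((3 : Nat) : Int)) by push_cast; ring]
          exact PySem.List.slice_natCast_add xs i 3
        rw [hs, PySem.List.slice?_none_none_neg_one]
        rw [show ((i : Int) + 3) = (((i + 3 : Nat)) : Int) by push_cast; ring]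
        rw [ih (i + 3) _ (by omega)]
        rw [chunk3_step (xs.drop i) (by simp; omega)]
        simp [List.drop_drop]
      · rw [if_neg hc]
        rw [chunk3_short _ (by simp; omega)]
        simp

theorem loop_eq_chunk3 (L : List String) (rest : List String) :
    ∀ (k : Nat) (acc : List (List String)),
      k % 3 = 0 →
      (∀ j : Nat, j < rest.length → PySem.List.pyGet? L ((k : Int) + (j : Int)) = rest[j]?) →
      ((PySem.List.enumerate rest (k : Int)).foldl (pvAStep L) (acc, [])).1
        = acc ++ chunk3 rest := by
  induction rest using chunk3.induct with
  | case1 a b c r ih =>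
      intro k acc hk hget
      have h0 := hget 0 (by simp)
      have h1 := hget 1 (by simp)
      have h2 := hget 2 (by simp)
      push_cast at h0 h1 h2
      simp only [List.getElem?_cons_zero, List.getElem?_cons_succ] at h0 h1 h2
      have d1 : ¬ ((3:Int) ∣ (k:Int) + 1) := by omega
      have d2 : ¬ ((3:Int) ∣ (k:Int) + 1 + 1) := by omega
      have d3 : ((3:Int) ∣ (k:Int) + 1 + 1 + 1) := by omega
      have g2 : PySem.List.pyGet? L ((k:Int) + 1 + 1) = some c := by
        rw [show ((k:Int) + 1 + 1) = (k:Int) + 2 by ring]; exact h2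
      have g1 : PySem.List.pyGet? L ((k:Int) + 1 + 1 - 1) = some b := by
        rw [show ((k:Int) + 1 + 1 - 1) = (k:Int) + 1 by ring]; exact h1
      have g0 : PySem.List.pyGet? L ((k:Int) + 1 + 1 - 2) = some a := by
        rw [show ((k:Int) + 1 + 1 - 2) = (k:Int) + 0 by ring]
        simpa using h0
      rw [PySem.List.enumerate_cons, PySem.List.enumerate_cons, PySem.List.enumerate_cons,
          List.foldl_cons, List.foldl_cons, List.foldl_cons]
      simp only [pvAStep, PySem.Int.mod_eq_zero_iff_dvd, beq_iff_eq,
        d1, d2, d3, g0, g1, g2, if_true, if_false]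
      simp only [Option.getD_some, List.nil_append]
      have hrec := ih (k + 3) (acc ++ [[c, b, a]]) (by omega)
        (by
          intro j hj
          have := hget (j + 3) (by simpa using by omega)
          have e : ((k + 3 : Nat) : Int) + (j : Int) = (k : Int) + ((j + 3 : Nat) : Int) := by
            push_cast; ring
          rw [e, this, show j + 3 = j + 1 + 1 + 1 by omega]
          simp [List.getElem?_cons_succ])
      have eenum : (k : Int) + 1 + 1 + 1 = ((k + 3 : Nat) : Int) := by push_cast; ring
      rw [eenum, hrec, chunk3]
      simp
  | case2 xs h =>
      intro k acc hk hget
      have d1 : ¬ ((3:Int) ∣ (k:Int) + 1) := by omega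
      have d2 : ¬ ((3:Int) ∣ (k:Int) + 1 + 1) := by omega
      match xs, h with
      | [], _ => simp [PySem.List.enumerate_nil, chunk3]
      | [a], _ =>
          simp [PySem.List.enumerate_cons, PySem.List.enumerate_nil, pvAStep, d1, chunk3]
      | [a, b], _ =>
          simp [PySem.List.enumerate_cons, PySem.List.enumerate_nil, pvAStep, d1, d2, chunk3]
      | a :: b :: c :: r, h => exact absurd rfl (h a b c r)

-- ===== VERDICT (by name: the statement is the Claim_ definition above) =====
theorem divide_input_data_into_groups_of_three_spec : Claim_equal_divide_input_data_into_groups_of_three := by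
  intro xs _
  unfold Spec_divide_input_data_into_groups_of_three divide_input_data_into_groups_of_three
    divide_input_data_into_groups_of_three_alt
  rw [show (0 : Int) = ((0 : Nat) : Int) by simp,
      pvBLoop_eq xs xs.length 0 [] (by omega)]
  simp only [List.drop_zero, List.nil_append]
  have := loop_eq_chunk3 xs xs 0 [] (by omega)
    (by intro j hj; simp)
  simpa using this
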